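-- pv_equiv track=rewrite | github.com/Gitonym/SemaphoreRecognition | collector.py | angle_to_letter
-- ===== SOURCE A (Python) =====
-- def angle_to_letter(right_angle, left_angle):
--     semaphore_letters = {
--         'A': (45, 0), 'B': (90, 0), 'C': (135, 0), 'D': (180, 0),
--         'E': (0, 225), 'F': (0, 270), 'G': (0, 315),
--         'H': (90, 45), 'I': (135, 45), 'J': (180, 270),
--         'K': (45, 180), 'L': (45, 225), 'M': (45, 270), 'N': (45, 315),
--         'O': (90, 135), 'P': (90, 180), 'Q': (90, 225),
--         'R': (90, 270), 'S': (90, 315), 'T': (135, 180),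
--         'U': (135, 225), 'V': (180, 315), 'W': (225, 270),
--         'X': (225, 315), 'Y': (135, 270), 'Z': (315, 270)
--     }
--     for letter, angles in semaphore_letters.items():
--         if right_angle == angles[0] and left_angle == angles[1]:
--             return letter
--     return '-'
-- ===== SOURCE B (Python) =====
-- # Arithmetic indexing: octant-encode the two angles and index a flat 64-char grid.
-- _GRID = '-----EFGA---KLMNBH-OPQRSCI--TUY-D-----JV------WX--------------Z-'
--
-- def angle_to_letter(right_angle, left_angle):
--     if right_angle % 45 != 0 or left_angle % 45 != 0:
--         return '-'
--     r = right_angle // 45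
--     l = left_angle // 45
--     if 0 <= r < 8 and 0 <= l < 8:
--         return _GRID[r * 8 + l]
--     return '-'
-- ===== Notes on version B (the rewrite author's own statement) =====
-- stated objective: alternative
-- what changed: Replaced the 26-entry pair-scan by arithmetic: both angles are reduced to octants via %45 and //45, range-checked, and the letter is read from a flat 64-character grid at index r*8+l (no pair comparisons, no table of angle pairs).
import Mathlib
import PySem

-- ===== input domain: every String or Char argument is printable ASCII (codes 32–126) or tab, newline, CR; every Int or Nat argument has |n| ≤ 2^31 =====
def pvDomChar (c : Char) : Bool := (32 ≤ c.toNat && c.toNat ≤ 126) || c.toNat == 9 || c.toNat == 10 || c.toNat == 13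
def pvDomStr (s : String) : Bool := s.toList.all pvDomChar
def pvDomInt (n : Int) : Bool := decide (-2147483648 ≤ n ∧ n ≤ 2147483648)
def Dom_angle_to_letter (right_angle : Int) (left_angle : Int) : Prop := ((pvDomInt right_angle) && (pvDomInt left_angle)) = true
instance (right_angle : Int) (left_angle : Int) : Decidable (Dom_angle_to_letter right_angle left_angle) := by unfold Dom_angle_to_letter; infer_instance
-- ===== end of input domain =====

-- B replaces A's 26-entry pair scan by arithmetic octant encoding (%45, //45,
-- range check) plus one index into a flat 64-character grid (alternative algorithm).


-- ===== PORT A =====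
-- A's dict of letter -> (right, left), iterated in insertion order.
def semaphoreLetters : List (String × (Int × Int)) :=
  [("A", (45, 0)), ("B", (90, 0)), ("C", (135, 0)), ("D", (180, 0)),
   ("E", (0, 225)), ("F", (0, 270)), ("G", (0, 315)),
   ("H", (90, 45)), ("I", (135, 45)), ("J", (180, 270)),
   ("K", (45, 180)), ("L", (45, 225)), ("M", (45, 270)), ("N", (45, 315)),
   ("O", (90, 135)), ("P", (90, 180)), ("Q", (90, 225)),
   ("R", (90, 270)), ("S", (90, 315)), ("T", (135, 180)),
   ("U", (135, 225)), ("V", (180, 315)), ("W", (225, 270)),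
   ("X", (225, 315)), ("Y", (135, 270)), ("Z", (315, 270))]

-- the 'for letter, angles in …: if …: return letter' loop
def angleLoop (items : List (String × (Int × Int))) (right_angle left_angle : Int) : String :=
  match items with
  | [] => "-"
  | (letter, angles) :: rest =>
      if right_angle = angles.1 ∧ left_angle = angles.2 then letter
      else angleLoop rest right_angle left_angle

def angle_to_letter (right_angle : Int) (left_angle : Int) : String :=
  angleLoop semaphoreLetters right_angle left_angle

-- ===== PORT B =====
-- B's flat 64-character grid, indexed by octants r*8+l.
def semaphoreGrid : String := "-----EFGA---KLMNBH-OPQRSCI--TUY-D-----JV------WX--------------Z-"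

def angle_to_letter_alt (right_angle : Int) (left_angle : Int) : String :=
  if PySem.Int.mod right_angle 45 ≠ 0 ∨ PySem.Int.mod left_angle 45 ≠ 0 then "-"
  else
    let r := PySem.Int.floordiv right_angle 45
    let l := PySem.Int.floordiv left_angle 45
    if 0 ≤ r ∧ r < 8 ∧ 0 ≤ l ∧ l < 8 then
      -- Python's _GRID[r*8+l]; the in-range guard above makes the index valid
      match PySem.Str.pyGet? semaphoreGrid (r * 8 + l) with
      | some c => String.ofList [c]
      | none => "-"
    else "-"

-- ===== PRECONDITION & SPEC =====
def Spec_angle_to_letter (right_angle : Int) (left_angle : Int) (out : String) : Prop := out = angle_to_letter_alt right_angle left_angle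
instance (right_angle : Int) (left_angle : Int) (out : String) : Decidable (Spec_angle_to_letter right_angle left_angle out) := by unfold Spec_angle_to_letter; infer_instance

-- ===== CLAIM =====
def Claim_equal_angle_to_letter : Prop := ∀ (right_angle : Int) (left_angle : Int), Dom_angle_to_letter right_angle left_angle → Spec_angle_to_letter right_angle left_angle (angle_to_letter right_angle left_angle)

-- ===== LEMMAS AND PROOFS =====

-- an angle that is a multiple of 45 inside [0, 360) is one of the eight octant values
theorem octant_values (x : Int) (h0 : 0 ≤ x) (h1 : x < 360) (hm : x % 45 = 0) :
    x = 0 ∨ x = 45 ∨ x = 90 ∨ x = 135 ∨ x = 180 ∨ x = 225 ∨ x = 270 ∨ x = 315 := by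
  omega

-- outside the octant grid (not a multiple of 45, or out of [0,360)), A's scan misses
-- A's scan returns '-' when no table pair matches
theorem angleLoop_miss (items : List (String × (Int × Int))) (r l : Int)
    (h : ∀ p ∈ items, ¬ (r = p.2.1 ∧ l = p.2.2)) : angleLoop items r l = "-" := by
  induction items with
  | nil => rfl
  | cons p rest ih =>
      obtain ⟨letter, a, b⟩ := p
      rw [angleLoop, if_neg (h _ List.mem_cons_self)]
      exact ih fun q hq => h q (List.mem_cons_of_mem _ hq)

-- outside the octant grid (not a multiple of 45, or out of [0,360)), A's scan misses
theorem angle_to_letter_miss (r l : Int)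
    (h : ¬ (r % 45 = 0 ∧ l % 45 = 0 ∧ 0 ≤ r ∧ r < 360 ∧ 0 ≤ l ∧ l < 360)) :
    angle_to_letter r l = "-" := by
  unfold angle_to_letter
  apply angleLoop_miss
  intro p hp
  fin_cases hp <;> dsimp only <;> omega

theorem angle_to_letter_alt_miss (r l : Int)
    (h : ¬ (r % 45 = 0 ∧ l % 45 = 0 ∧ 0 ≤ r ∧ r < 360 ∧ 0 ≤ l ∧ l < 360)) :
    angle_to_letter_alt r l = "-" := by
  unfold angle_to_letter_alt
  dsimp only
  rw [PySem.Int.mod_eq_emod_of_pos (a := r) (by norm_num : (0:Int) < 45),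
      PySem.Int.mod_eq_emod_of_pos (a := l) (by norm_num : (0:Int) < 45),
      PySem.Int.floordiv_eq_ediv_of_pos (a := r) (by norm_num : (0:Int) < 45),
      PySem.Int.floordiv_eq_ediv_of_pos (a := l) (by norm_num : (0:Int) < 45)]
  split_ifs with h1 h2 <;> try rfl
  exfalso
  rw [not_or, not_ne_iff, not_ne_iff] at h1
  omega

-- ===== VERDICT =====
theorem angle_to_letter_spec : Claim_equal_angle_to_letter := by
  intro r l _
  unfold Spec_angle_to_letter
  by_cases h : r % 45 = 0 ∧ l % 45 = 0 ∧ 0 ≤ r ∧ r < 360 ∧ 0 ≤ l ∧ l < 360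
  · obtain ⟨hr, hl, hr0, hr1, hl0, hl1⟩ := h
    rcases octant_values r hr0 hr1 hr with rfl|rfl|rfl|rfl|rfl|rfl|rfl|rfl <;>
      rcases octant_values l hl0 hl1 hl with rfl|rfl|rfl|rfl|rfl|rfl|rfl|rfl <;>
      decide
  · rw [angle_to_letter_miss r l h, angle_to_letter_alt_miss r l h]
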